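-- pv_equiv track=rewrite | github.com/vh42720/GrokkingAlgo | Interview/python/python_extra.py | smallest_odd_integer
-- ===== SOURCE A (Python) =====
-- def smallest_odd_integer(num):
-- 	"""
-- 	Practice Problem 4: Smallest Odd Integer Formation
-- 	Given an integer, return the smallest integer that can be formed using only its odd digits.
-- 	Example: 1234 -> 13
-- 	Edge Cases: Negative numbers (e.g., -23) or inputs with only even digits (e.g., 24 or 0) should return None.
-- 	"""
-- 	if num < 0:
-- 		nums = abs(num)
--
-- 	digits = list(str(num))
-- 	odd_digits = [digit for digit in digits if int(digit) % 2 == 1]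
-- 	if not odd_digits:
-- 		return -1
--
-- 	odd_digits.sort()
-- 	return int(''.join(odd_digits))
-- ===== SOURCE B (Python) =====
-- def smallest_odd_integer(num):
-- 	# Counting sort over the five possible odd digits instead of sort().
-- 	counts = [0, 0, 0, 0, 0]  # counts[i] = occurrences of odd digit 2*i+1
-- 	for ch in str(num):
-- 		d = int(ch)
-- 		if d % 2 == 1:
-- 			counts[d // 2] += 1
-- 	if not any(counts):
-- 		return -1
-- 	return int(''.join(str(2 * i + 1) * c for i, c in enumerate(counts)))
-- ===== Notes on version B (the rewrite author's own statement) =====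
-- stated objective: alternative
-- what changed: Replaces filter-then-comparison-sort of the odd digit characters with a single counting pass over str(num) into a 5-entry count table, emitting the odd digits 1,3,5,7,9 in ascending order (counting sort over a fixed alphabet).
import Mathlib
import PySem

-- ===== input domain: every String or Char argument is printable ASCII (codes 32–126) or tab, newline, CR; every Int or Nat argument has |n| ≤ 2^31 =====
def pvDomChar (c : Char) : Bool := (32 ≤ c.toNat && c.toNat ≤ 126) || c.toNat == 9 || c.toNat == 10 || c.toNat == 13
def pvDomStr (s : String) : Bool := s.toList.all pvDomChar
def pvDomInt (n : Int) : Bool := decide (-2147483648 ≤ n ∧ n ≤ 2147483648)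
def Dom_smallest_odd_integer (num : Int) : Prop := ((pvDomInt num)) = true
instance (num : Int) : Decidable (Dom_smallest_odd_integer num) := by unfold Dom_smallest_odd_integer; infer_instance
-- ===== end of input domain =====

-- B replaces the comparison sort of A by a counting sort over the five odd digits (alternative
-- algorithm, same results).  Both Pythons raise ValueError on num < 0 (int('-')), excluded by Pre_.

-- ===== PORT A =====
-- int(digit) for a one-character string; Python raises on non-digits — Pre_ excludes those inputs,
-- so the .getD 0 default is never semantically relevant.
def pvCharInt (c : Char) : Int := (PySem.Int.ofStr? (String.mk [c])).getD 0

def smallest_odd_integer (num : Int) : Int :=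
  -- 'if num < 0: nums = abs(num)' binds a variable that is never used again — no effect on the result
  let digits := (PySem.Int.toStr num).toList
  let odd_digits := digits.filter (fun digit => PySem.Int.mod (pvCharInt digit) 2 == 1)
  if odd_digits = [] then -1
  else (PySem.Int.ofStr? (String.mk (PySem.List.sorted odd_digits (fun x => x) false))).getD 0

-- ===== PORT B =====
-- counts[d // 2] += 1 on the 5-slot table
def pvBump (cs : Nat × Nat × Nat × Nat × Nat) (i : Int) : Nat × Nat × Nat × Nat × Nat :=
  match cs, i with
  | (a, b, c, d, e), 0 => (a + 1, b, c, d, e)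
  | (a, b, c, d, e), 1 => (a, b + 1, c, d, e)
  | (a, b, c, d, e), 2 => (a, b, c + 1, d, e)
  | (a, b, c, d, e), 3 => (a, b, c, d + 1, e)
  | (a, b, c, d, e), 4 => (a, b, c, d, e + 1)
  | cs, _ => cs

def smallest_odd_integer_alt (num : Int) : Int :=
  let counts := (PySem.Int.toStr num).toList.foldl
    (fun cs ch =>
      let d := pvCharInt ch
      if PySem.Int.mod d 2 == 1 then pvBump cs (PySem.Int.floordiv d 2) else cs)
    (0, 0, 0, 0, 0)
  match counts with
  | (a, b, c, d, e) =>
    if a = 0 ∧ b = 0 ∧ c = 0 ∧ d = 0 ∧ e = 0 then -1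
    else
      (PySem.Int.ofStr? (String.mk
        (List.replicate a '1' ++ List.replicate b '3' ++ List.replicate c '5' ++
         List.replicate d '7' ++ List.replicate e '9'))).getD 0

-- ===== PRECONDITION & SPEC =====
-- Pre_ excludes num < 0: there str(num) contains '-' and both Pythons raise ValueError at int('-').
def Pre_smallest_odd_integer (num : Int) : Prop := 0 ≤ num
instance (num : Int) : Decidable (Pre_smallest_odd_integer num) := by unfold Pre_smallest_odd_integer; infer_instance
def pvWitness_smallest_odd_integer : Int := 1234

def Spec_smallest_odd_integer (num : Int) (out : Int) : Prop := out = smallest_odd_integer_alt num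
instance (num : Int) (out : Int) : Decidable (Spec_smallest_odd_integer num out) := by unfold Spec_smallest_odd_integer; infer_instance

-- ===== CLAIM (what is proved, stated in full; the proofs are below) =====
def Claim_equal_smallest_odd_integer : Prop := ∀ (num : Int), Dom_smallest_odd_integer num → Pre_smallest_odd_integer num → Spec_smallest_odd_integer num (smallest_odd_integer num)

-- ===== LEMMAS AND PROOFS =====

def pvDigits : List Char := ['0', '1', '2', '3', '4', '5', '6', '7', '8', '9']

theorem mem_toDigitsCore (fuel : Nat) : ∀ (n : Nat) (acc : List Char),
    ∀ c ∈ Nat.toDigitsCore 10 fuel n acc, c ∈ acc ∨ c ∈ pvDigits := by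
  induction fuel with
  | zero => intro n acc c hc; exact Or.inl hc
  | succ fuel ih =>
    intro n acc c hc
    have hdig : (n % 10).digitChar ∈ pvDigits := by
      have hlt : n % 10 < 10 := Nat.mod_lt _ (by norm_num)
      interval_cases h : n % 10 <;> decide
    simp only [Nat.toDigitsCore] at hc
    split at hc
    · rcases List.mem_cons.1 hc with rfl | hc
      · exact Or.inr hdig
      · exact Or.inl hc
    · rcases ih _ _ c hc with hc | hc
      · rcases List.mem_cons.1 hc with rfl | hc
        · exact Or.inr hdig
        · exact Or.inl hc
      · exact Or.inr hc

theorem mem_toStr_digits (n : Int) (hn : 0 ≤ n) :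
    ∀ c ∈ (PySem.Int.toStr n).toList, c ∈ pvDigits := by
  intro c hc
  rw [PySem.Int.toList_toStr] at hc
  unfold PySem.Int.toChars at hc
  rw [if_neg (by omega)] at hc
  rcases mem_toDigitsCore _ _ _ c hc with h | h
  · simp at h
  · exact h

def pvOddP (c : Char) : Bool := PySem.Int.mod (pvCharInt c) 2 == 1

def pvOdds : List Char := ['1', '3', '5', '7', '9']

theorem oddP_of_digit (c : Char) (hc : c ∈ pvDigits) : pvOddP c = decide (c ∈ pvOdds) := by
  fin_cases hc <;> decide

def pvStep (cs : Nat × Nat × Nat × Nat × Nat) (ch : Char) : Nat × Nat × Nat × Nat × Nat :=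
  if PySem.Int.mod (pvCharInt ch) 2 == 1 then pvBump cs (PySem.Int.floordiv (pvCharInt ch) 2) else cs

theorem pvStep_0 (cs : Nat × Nat × Nat × Nat × Nat) : pvStep cs '0' = cs := rfl
theorem pvStep_2 (cs : Nat × Nat × Nat × Nat × Nat) : pvStep cs '2' = cs := rfl
theorem pvStep_4 (cs : Nat × Nat × Nat × Nat × Nat) : pvStep cs '4' = cs := rfl
theorem pvStep_6 (cs : Nat × Nat × Nat × Nat × Nat) : pvStep cs '6' = cs := rfl
theorem pvStep_8 (cs : Nat × Nat × Nat × Nat × Nat) : pvStep cs '8' = cs := rfl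

theorem pvStep_1 (a b c d e : Nat) : pvStep (a, b, c, d, e) '1' = (a + 1, b, c, d, e) := rfl
theorem pvStep_3 (a b c d e : Nat) : pvStep (a, b, c, d, e) '3' = (a, b + 1, c, d, e) := rfl
theorem pvStep_5 (a b c d e : Nat) : pvStep (a, b, c, d, e) '5' = (a, b, c + 1, d, e) := rfl
theorem pvStep_7 (a b c d e : Nat) : pvStep (a, b, c, d, e) '7' = (a, b, c, d + 1, e) := rfl
theorem pvStep_9 (a b c d e : Nat) : pvStep (a, b, c, d, e) '9' = (a, b, c, d, e + 1) := rfl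

theorem foldl_counts (l : List Char) (hl : ∀ c ∈ l, c ∈ pvDigits)
    (a b c d e : Nat) :
    l.foldl pvStep (a, b, c, d, e) =
      (a + l.count '1', b + l.count '3', c + l.count '5', d + l.count '7', e + l.count '9') := by
  induction l generalizing a b c d e with
  | nil => simp
  | cons h t ih =>
    have hh := hl h (List.mem_cons_self ..)
    have ht : ∀ c ∈ t, c ∈ pvDigits := fun c hc => hl c (List.mem_cons_of_mem _ hc)
    simp only [List.foldl_cons]
    fin_cases hh <;>
      simp [pvStep_0, pvStep_2, pvStep_4, pvStep_6, pvStep_8,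
        pvStep_1, pvStep_3, pvStep_5, pvStep_7, pvStep_9, ih ht] <;> omega

theorem count_filter_odd (l : List Char) (hl : ∀ c ∈ l, c ∈ pvDigits) (x : Char) :
    (l.filter pvOddP).count x = if x ∈ pvOdds then l.count x else 0 := by
  split
  · next hx =>
    rw [List.count_filter]
    have : pvOddP x = true := by fin_cases hx <;> decide
    simp [this]
  · next hx =>
    rw [List.count_eq_zero]
    intro hmem
    have h1 := List.mem_of_mem_filter hmem
    have h2 := List.of_mem_filter hmem
    rw [oddP_of_digit x (hl x h1)] at h2
    exact hx (by simpa using h2)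

theorem sorted_odds (l : List Char) (hl : ∀ c ∈ l, c ∈ pvDigits) :
    PySem.List.sorted (l.filter pvOddP) (fun x => x) false =
      List.replicate (l.count '1') '1' ++ List.replicate (l.count '3') '3' ++
      List.replicate (l.count '5') '5' ++ List.replicate (l.count '7') '7' ++
      List.replicate (l.count '9') '9' := by
  apply PySem.List.sorted_id_eq_of_perm_of_pairwise
  · rw [List.perm_iff_count]
    intro x
    rw [count_filter_odd l hl x]
    by_cases hx : x ∈ pvOdds
    · fin_cases hx <;> simp [List.count_append, List.count_replicate, pvOdds]
    · simp only [List.count_append, List.count_replicate]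
      have h1 : x ≠ '1' := fun h => hx (by simp [h, pvOdds])
      have h3 : x ≠ '3' := fun h => hx (by simp [h, pvOdds])
      have h5 : x ≠ '5' := fun h => hx (by simp [h, pvOdds])
      have h7 : x ≠ '7' := fun h => hx (by simp [h, pvOdds])
      have h9 : x ≠ '9' := fun h => hx (by simp [h, pvOdds])
      simp [hx, Ne.symm h1, Ne.symm h3, Ne.symm h5, Ne.symm h7, Ne.symm h9]
  · have key : ∀ (n : Nat) (a : Char) (rest : List Char), rest.Pairwise (· ≤ ·) →
        (∀ b ∈ rest, a ≤ b) → (List.replicate n a ++ rest).Pairwise (· ≤ ·) := by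
      intro n a rest h ha
      rw [List.pairwise_append]
      exact ⟨List.pairwise_replicate.mpr (Or.inr le_rfl), h,
        fun x hx y hy => (List.eq_of_mem_replicate hx) ▸ ha y hy⟩
    rw [List.append_assoc, List.append_assoc, List.append_assoc]
    apply key _ _ _ (key _ _ _ (key _ _ _ (key _ _ _
      (List.pairwise_replicate.mpr (Or.inr le_rfl)) ?_) ?_) ?_) ?_ <;>
      intro b hb <;>
      simp only [List.mem_append, List.mem_replicate] at hb <;>
      first
        | (rcases hb with ⟨-, rfl⟩ | ⟨-, rfl⟩ | ⟨-, rfl⟩ | ⟨-, rfl⟩ <;> decide)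
        | (rcases hb with ⟨-, rfl⟩ | ⟨-, rfl⟩ | ⟨-, rfl⟩ <;> decide)
        | (rcases hb with ⟨-, rfl⟩ | ⟨-, rfl⟩ <;> decide)
        | (rcases hb with ⟨-, rfl⟩; decide)

theorem filter_empty_iff (l : List Char) (hl : ∀ c ∈ l, c ∈ pvDigits) :
    l.filter pvOddP = [] ↔
      l.count '1' = 0 ∧ l.count '3' = 0 ∧ l.count '5' = 0 ∧ l.count '7' = 0 ∧ l.count '9' = 0 := by
  constructor
  · intro h
    have hc : ∀ x ∈ pvOdds, l.count x = 0 := by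
      intro x hx
      have := count_filter_odd l hl x
      rw [h] at this
      simpa [hx] using this.symm
    exact ⟨hc '1' (by decide), hc '3' (by decide), hc '5' (by decide),
      hc '7' (by decide), hc '9' (by decide)⟩
  · rintro ⟨h1, h3, h5, h7, h9⟩
    rw [List.filter_eq_nil_iff]
    intro c hc
    rw [oddP_of_digit c (hl c hc)]
    simp only [decide_eq_true_eq, pvOdds, List.mem_cons, List.not_mem_nil, or_false]
    rintro (rfl | rfl | rfl | rfl | rfl) <;> simp_all [List.count_eq_zero]

-- ===== VERDICT (by name: the statement is the Claim_ definition above) =====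
theorem smallest_odd_integer_spec : Claim_equal_smallest_odd_integer := by
  intro num _ hpre
  unfold Spec_smallest_odd_integer smallest_odd_integer smallest_odd_integer_alt
  have hl := mem_toStr_digits num hpre
  set l := (PySem.Int.toStr num).toList with hldef
  have hfold := foldl_counts l hl 0 0 0 0 0
  have hstep : (fun cs ch =>
      let d := pvCharInt ch
      if PySem.Int.mod d 2 == 1 then pvBump cs (PySem.Int.floordiv d 2) else cs) = pvStep := rfl
  simp only [hstep, hfold, Nat.zero_add]
  have hfil : l.filter (fun digit => PySem.Int.mod (pvCharInt digit) 2 == 1) = l.filter pvOddP := rfl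
  rw [hfil]
  by_cases hemp : l.filter pvOddP = []
  · rw [if_pos hemp, if_pos ((filter_empty_iff l hl).1 hemp)]
  · rw [if_neg hemp, if_neg (fun h => hemp ((filter_empty_iff l hl).2 h))]
    rw [sorted_odds l hl]
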